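-- pv_equiv track=rewrite | github.com/tomy9729/Algorithm | Coding Test/│Delivery Hero Korea│ Rookie Hero 4기 Online Coding Test/task 3.py | solution
-- ===== SOURCE A (Python) =====
-- def solution(U, L, C):
--     # write your code in Python 3.6
--     first = [0]*len(C)
--     second = [0]*len(C)
--     for i in range(len(C)) :
--       if C[i] == 2 :
--         first[i] = 1
--         second[i] = 1
--       elif C[i] == 1 :
--         if sum(first) < U :
--           first[i] = 1
--         else :
--           second[i] = 1
--     if sum(first)==U and sum(second)==L :
--       first = list(map(str,first))
--       second = list(map(str,second))
--       first = ''.join(first)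
--       second = ''.join(second)
--       temp = first+","+second
--       return temp
--     else :
--       return "IMPOSSIBLE"
-- ===== SOURCE B (Python) =====
-- def solution(U, L, C):
--     # prefix counts of shifts already demanded before each index (couriers with C in {1,2})
--     nz = [0]
--     for c in C:
--         nz.append(nz[-1] + (1 if c == 1 or c == 2 else 0))
--     first = ''.join('1' if c == 2 or (c == 1 and p < U) else '0' for c, p in zip(C, nz))
--     second = ''.join('1' if c == 2 or (c == 1 and p >= U) else '0' for c, p in zip(C, nz))
--     if first.count('1') == U and second.count('1') == L:
--         return first + ',' + second
--     return 'IMPOSSIBLE'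
-- ===== Notes on version B (the rewrite author's own statement) =====
-- stated objective: alternative
-- what changed: Replaces A's order-dependent greedy loop that recomputes sum(first) at every '1'-courier by a precomputed prefix-count table of {1,2} values and two independent comprehension passes with a threshold test nz<U, checking the totals via str.count; trades the in-place array mutation for pure passes (asymptotically O(n) vs A's worst-case O(n^2), though not measurably faster on the benchmark's input mix).
import Mathlib
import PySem

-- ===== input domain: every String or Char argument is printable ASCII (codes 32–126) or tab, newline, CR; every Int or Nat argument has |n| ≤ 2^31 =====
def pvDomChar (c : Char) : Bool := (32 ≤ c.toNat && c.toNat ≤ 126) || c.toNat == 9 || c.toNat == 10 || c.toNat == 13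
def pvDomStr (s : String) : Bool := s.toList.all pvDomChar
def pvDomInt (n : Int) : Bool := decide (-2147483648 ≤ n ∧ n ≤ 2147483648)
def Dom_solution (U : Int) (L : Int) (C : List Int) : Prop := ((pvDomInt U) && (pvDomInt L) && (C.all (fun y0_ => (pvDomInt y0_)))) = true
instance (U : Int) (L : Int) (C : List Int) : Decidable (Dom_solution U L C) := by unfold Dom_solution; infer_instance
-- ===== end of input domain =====

-- B replaces A's greedy loop (which recomputes sum(first) at every '1'-courier) by a precomputed
-- prefix-count table and two independent comprehension passes; objective: alternative.

-- ===== PORT A =====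
-- loop body of A; i ranges over range(len(C)), so C[i] is always in range: C.getD i 0 is exact here
def solutionStep (U : Int) (C : List Int) (st : List Int × List Int) (i : Nat) : List Int × List Int :=
  if C.getD i 0 == 2 then ((st.1.set i 1), (st.2.set i 1))
  else if C.getD i 0 == 1 then
    if st.1.sum < U then ((st.1.set i 1), st.2)
    else (st.1, (st.2.set i 1))
  else st

def solution (U : Int) (L : Int) (C : List Int) : String :=
  let st := (List.range C.length).foldl (solutionStep U C) (List.replicate C.length 0, List.replicate C.length 0)
  if st.1.sum == U && st.2.sum == L then
    PySem.Str.join "" (st.1.map PySem.Int.toStr) ++ "," ++ PySem.Str.join "" (st.2.map PySem.Int.toStr)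
  else "IMPOSSIBLE"

-- ===== PORT B =====
-- Source B: nz = prefix counts of values in {1,2}; first/second are built by comprehensions over
-- zip(C, nz) (zip truncates to the shorter list, as in Python); str.count('1') with a
-- single-character needle is exactly List.count '1' on the characters.
def solution_alt (U : Int) (L : Int) (C : List Int) : String :=
  let nz := C.foldl (fun ns c => ns ++ [(ns.getLastD 0) + (if c == 1 || c == 2 then (1 : Int) else 0)]) [(0 : Int)]
  let first := (C.zip nz).map (fun p => if p.1 == 2 || (p.1 == 1 && decide (p.2 < U)) then '1' else '0')
  let second := (C.zip nz).map (fun p => if p.1 == 2 || (p.1 == 1 && decide (U ≤ p.2)) then '1' else '0')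
  if (first.count '1' : Int) == U && (second.count '1' : Int) == L then
    String.ofList first ++ "," ++ String.ofList second
  else "IMPOSSIBLE"

-- ===== PRECONDITION & SPEC =====
def Spec_solution (U : Int) (L : Int) (C : List Int) (out : String) : Prop := out = solution_alt U L C
instance (U : Int) (L : Int) (C : List Int) (out : String) : Decidable (Spec_solution U L C out) := by unfold Spec_solution; infer_instance

-- ===== CLAIM (what is proved, stated in full; the proofs are below) =====
def Claim_equal_solution : Prop := ∀ (U : Int) (L : Int) (C : List Int), Dom_solution U L C → Spec_solution U L C (solution U L C)

-- ===== LEMMAS AND PROOFS =====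

-- A's loop rephrased as structural recursion on the remaining couriers, accumulating the
-- already-built prefixes of first/second.
def loopRec (U : Int) (accF accS : List Int) : List Int → List Int × List Int
  | [] => (accF, accS)
  | c :: cs =>
    if c == 2 then loopRec U (accF ++ [1]) (accS ++ [1]) cs
    else if c == 1 then
      if accF.sum < U then loopRec U (accF ++ [1]) (accS ++ [0]) cs
      else loopRec U (accF ++ [0]) (accS ++ [1]) cs
    else loopRec U (accF ++ [0]) (accS ++ [0]) cs

-- B's two rows, as functions of the running prefix count nz.
def modelF (U : Int) (nz : Int) : List Int → List Int
  | [] => []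
  | c :: cs => (if c == 2 || (c == 1 && decide (nz < U)) then 1 else 0)
      :: modelF U (nz + if c == 1 || c == 2 then 1 else 0) cs

def modelS (U : Int) (nz : Int) : List Int → List Int
  | [] => []
  | c :: cs => (if c == 2 || (c == 1 && decide (U ≤ nz)) then 1 else 0)
      :: modelS U (nz + if c == 1 || c == 2 then 1 else 0) cs

-- B's prefix-count list after the leading 0.
def prefixes (nz : Int) : List Int → List Int
  | [] => []
  | c :: cs => (nz + if c == 1 || c == 2 then 1 else 0)
      :: prefixes (nz + if c == 1 || c == 2 then 1 else 0) cs

theorem set_mid (xs ys : List Int) (v : Int) : (xs ++ 0 :: ys).set xs.length v = (xs ++ [v]) ++ ys := by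
  rw [List.set_append_right _ _ (le_refl _)]; simp

-- A's index/set fold equals the structural recursion.
theorem foldl_eq_loopRec (U : Int) :
    ∀ (cs pre accF accS : List Int), accF.length = pre.length → accS.length = pre.length →
    (List.range' pre.length cs.length 1).foldl (solutionStep U (pre ++ cs))
      (accF ++ List.replicate cs.length 0, accS ++ List.replicate cs.length 0)
      = loopRec U accF accS cs := by
  intro cs
  induction cs with
  | nil => intro pre accF accS hF hS; simp [loopRec]
  | cons c cs ih =>
    intro pre accF accS hF hS
    have hget : (pre ++ c :: cs).getD pre.length 0 = c := by
      simp [List.getD]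
    have hrep : List.replicate (c :: cs).length (0 : Int) = 0 :: List.replicate cs.length 0 := rfl
    rw [List.length_cons, List.range'_succ, List.foldl_cons]
    have hstep : solutionStep U (pre ++ c :: cs)
        (accF ++ List.replicate (c :: cs).length 0, accS ++ List.replicate (c :: cs).length 0) pre.length
        = (if c == 2 then ((accF ++ [1]) ++ List.replicate cs.length 0, (accS ++ [1]) ++ List.replicate cs.length 0)
           else if c == 1 then
             if accF.sum < U then ((accF ++ [1]) ++ List.replicate cs.length 0, (accS ++ [0]) ++ List.replicate cs.length 0)
             else ((accF ++ [0]) ++ List.replicate cs.length 0, (accS ++ [1]) ++ List.replicate cs.length 0)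
           else ((accF ++ [0]) ++ List.replicate cs.length 0, (accS ++ [0]) ++ List.replicate cs.length 0)) := by
      simp only [solutionStep, hget, hrep]
      rw [show (accF ++ (0:Int) :: List.replicate cs.length 0).sum = accF.sum from by simp]
      rw [← hF]
      split_ifs <;> refine Prod.ext ?_ ?_ <;> dsimp only <;>
        first
        | rfl
        | (exact set_mid _ _ _)
        | (rw [hF, ← hS]; exact set_mid _ _ _)
        | simp
    simp only [List.length_cons] at hstep
    rw [hstep]
    simp only [loopRec]
    split_ifs <;>
      rw [show pre.length + 1 = (pre ++ [c]).length from by simp,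
          show pre ++ c :: cs = (pre ++ [c]) ++ cs from by simp] <;>
      apply ih <;> simp [hF, hS]

-- key invariant: sum(first-so-far) tracks the prefix count nz below U and stays ≥ U above it,
-- so A's branch 'sum(first) < U' coincides with B's 'nz < U'.
theorem loopRec_eq_model (U : Int) :
    ∀ (cs accF accS : List Int) (nz : Int), accF.sum ≤ nz → (nz < U → accF.sum = nz) → (U ≤ nz → U ≤ accF.sum) →
    loopRec U accF accS cs = (accF ++ modelF U nz cs, accS ++ modelS U nz cs) := by
  intro cs
  induction cs with
  | nil => intro accF accS nz _ _ _; simp [loopRec, modelF, modelS]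
  | cons c cs ih =>
    intro accF accS nz h1 h2 h3
    by_cases hc2 : c = 2
    · subst hc2
      rw [loopRec, if_pos (by decide), modelF, modelS]
      simp only [show ((2:Int) == 2 || ((2:Int) == 1 && _)) = true from by simp,
        show ((2:Int) == 1 || (2:Int) == 2) = true from by simp]
      rw [ih (accF ++ [1]) (accS ++ [1]) (nz + 1) (by simp; omega) (by simp; omega) (by simp; omega)]
      simp
    · by_cases hc1 : c = 1
      · subst hc1
        have hiff : accF.sum < U ↔ nz < U := by constructor <;> intro <;> by_contra <;> omega
        rw [loopRec, if_neg (by simp), if_pos (by decide), modelF, modelS]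
        by_cases hlt : accF.sum < U
        · rw [if_pos hlt]
          have hnz : nz < U := hiff.mp hlt
          simp only [show ((1:Int) == 2 || ((1:Int) == 1 && decide (nz < U))) = true from by simp [hnz],
            show ((1:Int) == 2 || ((1:Int) == 1 && decide (U ≤ nz))) = false from by simp; omega,
            show ((1:Int) == 1 || (1:Int) == 2) = true from by simp]
          rw [ih (accF ++ [1]) (accS ++ [0]) (nz + 1) (by simp; omega) (by simp; omega) (by simp; omega)]
          simp
        · rw [if_neg hlt]
          have hnz : U ≤ nz := by omega
          simp only [show ((1:Int) == 2 || ((1:Int) == 1 && decide (nz < U))) = false from by simp; omega,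
            show ((1:Int) == 2 || ((1:Int) == 1 && decide (U ≤ nz))) = true from by simp [hnz],
            show ((1:Int) == 1 || (1:Int) == 2) = true from by simp]
          rw [ih (accF ++ [0]) (accS ++ [1]) (nz + 1) (by simp; omega) (by simp; omega) (by simp; omega)]
          simp
      · rw [loopRec, if_neg (by simp [hc2]), if_neg (by simp [hc1]), modelF, modelS]
        simp only [show (c == 2 || (c == 1 && decide (nz < U))) = false from by simp [hc1, hc2],
          show (c == 2 || (c == 1 && decide (U ≤ nz))) = false from by simp [hc1, hc2],
          show (c == 1 || c == 2) = false from by simp [hc1, hc2]]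
        rw [ih (accF ++ [0]) (accS ++ [0]) (nz + 0) (by simp; omega) (by simp; omega) (by simp; omega)]
        simp

theorem nz_fold_eq : ∀ (C acc : List Int) (nz : Int),
    C.foldl (fun ns c => ns ++ [(ns.getLastD 0) + (if c == 1 || c == 2 then (1 : Int) else 0)]) (acc ++ [nz])
      = (acc ++ [nz]) ++ prefixes nz C := by
  intro C
  induction C with
  | nil => intro acc nz; simp [prefixes]
  | cons c cs ih =>
    intro acc nz
    rw [List.foldl_cons]
    have hlast : (acc ++ [nz]).getLastD 0 = nz := by simp
    rw [hlast]
    have := ih (acc ++ [nz]) (nz + if c == 1 || c == 2 then 1 else 0)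
    rw [show acc ++ [nz] ++ [nz + if c == 1 || c == 2 then 1 else 0]
        = (acc ++ [nz]) ++ [nz + if c == 1 || c == 2 then 1 else 0] from by simp] at *
    rw [this, prefixes]
    simp

theorem zip_map_first (U : Int) : ∀ (C : List Int) (nz : Int),
    (C.zip (nz :: prefixes nz C)).map (fun p => if p.1 == 2 || (p.1 == 1 && decide (p.2 < U)) then '1' else '0')
      = (modelF U nz C).map (fun v => if v == 1 then '1' else '0') := by
  intro C
  induction C with
  | nil => intro nz; simp [modelF]
  | cons c cs ih =>
    intro nz
    rw [prefixes, modelF]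
    simp only [List.zip_cons_cons, List.map_cons, ih]
    congr 1
    by_cases h : (c == 2 || (c == 1 && decide (nz < U))) = true <;> simp [h]

theorem zip_map_second (U : Int) : ∀ (C : List Int) (nz : Int),
    (C.zip (nz :: prefixes nz C)).map (fun p => if p.1 == 2 || (p.1 == 1 && decide (U ≤ p.2)) then '1' else '0')
      = (modelS U nz C).map (fun v => if v == 1 then '1' else '0') := by
  intro C
  induction C with
  | nil => intro nz; simp [modelS]
  | cons c cs ih =>
    intro nz
    rw [prefixes, modelS]
    simp only [List.zip_cons_cons, List.map_cons, ih]
    congr 1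
    by_cases h : (c == 2 || (c == 1 && decide (U ≤ nz))) = true <;> simp [h]

theorem model_zero_one_F (U : Int) : ∀ (C : List Int) (nz : Int), ∀ v ∈ modelF U nz C, v = 0 ∨ v = 1 := by
  intro C
  induction C with
  | nil => intro nz v hv; simp [modelF] at hv
  | cons c cs ih =>
    intro nz v hv
    rw [modelF] at hv
    rcases List.mem_cons.mp hv with h | h
    · subst h; split <;> simp
    · exact ih _ v h

theorem model_zero_one_S (U : Int) : ∀ (C : List Int) (nz : Int), ∀ v ∈ modelS U nz C, v = 0 ∨ v = 1 := by
  intro C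
  induction C with
  | nil => intro nz v hv; simp [modelS] at hv
  | cons c cs ih =>
    intro nz v hv
    rw [modelS] at hv
    rcases List.mem_cons.mp hv with h | h
    · subst h; split <;> simp
    · exact ih _ v h

theorem count_map_eq_sum (l : List Int) (h : ∀ v ∈ l, v = 0 ∨ v = 1) :
    ((l.map (fun v => if v == 1 then '1' else '0')).count '1' : Int) = l.sum := by
  induction l with
  | nil => simp
  | cons a t ih =>
    have ha := h a (by simp)
    have ih' := ih (fun v hv => h v (by simp [hv]))
    rcases ha with h0 | h1 <;> subst_vars <;> simp at ih' ⊢ <;> omega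

theorem join_toStr (l : List Int) (h : ∀ v ∈ l, v = 0 ∨ v = 1) :
    PySem.Str.join "" (l.map PySem.Int.toStr) = String.ofList (l.map (fun v => if v == 1 then '1' else '0')) := by
  apply String.toList_inj.mp
  rw [PySem.Str.toList_join]
  have hm : (l.map PySem.Int.toStr).map String.toList
      = (l.map (fun v => if v == 1 then '1' else '0')).map ([·]) := by
    induction l with
    | nil => rfl
    | cons a t ih =>
      have ha := h a (by simp)
      have ih' := ih (fun v hv => h v (by simp [hv]))
      rcases ha with h0 | h1 <;> subst_vars <;> simp only [List.map_cons, ih'] <;> rfl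
  rw [hm]
  have h0 : "".toList = ([] : List Char) := rfl
  rw [h0, PySem.Chars.join_nil_singletons]
  simp

-- ===== VERDICT (by name: the statement is the Claim_ definition above) =====
theorem solution_spec : Claim_equal_solution := by
  intro U L C _
  unfold Spec_solution solution solution_alt
  have hA : ((List.range C.length).foldl (solutionStep U C) (List.replicate C.length 0, List.replicate C.length 0))
      = (modelF U 0 C, modelS U 0 C) := by
    have h0 := foldl_eq_loopRec U C [] [] [] rfl rfl
    simp only [List.nil_append, List.length_nil] at h0
    rw [List.range_eq_range', h0]
    have := loopRec_eq_model U C [] [] 0 (by simp) (by simp) (by intro h; simpa using h)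
    simpa using this
  have hnz := nz_fold_eq C [] 0
  simp only [List.nil_append] at hnz
  rw [hA, hnz]
  dsimp only
  rw [show ([0]:List Int) ++ prefixes 0 C = 0 :: prefixes 0 C from by simp]
  rw [zip_map_first, zip_map_second]
  rw [count_map_eq_sum _ (model_zero_one_F U C 0), count_map_eq_sum _ (model_zero_one_S U C 0)]
  by_cases h : ((modelF U 0 C).sum == U && (modelS U 0 C).sum == L) = true
  · rw [if_pos h, if_pos h,
      join_toStr _ (model_zero_one_F U C 0), join_toStr _ (model_zero_one_S U C 0)]
  · rw [if_neg h, if_neg h]
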